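-- pv_equiv track=rewrite | github.com/KedharAdithya/6Companies30Days | Goldman Sachs/Day8/8.Maximum Points in an Archery Competition.py | maximumBobPoints
-- ===== SOURCE A (Python) =====
-- from typing import List
--
-- def maximumBobPoints(numArrows: int, aliceArrows: List[int]) -> List[int]:
--     max_points = 0
--     best_choice = [0] * 12
--     for mask in range(2**12):
--         bob_taken = 0
--         bob_points = 0
--         choice = [0] * 12
--         for j in range(12):
--             if ((1<<j) & mask) > 0:
--                 bob_taken += aliceArrows[j] + 1
--                 bob_points += j
--                 choice[j] = aliceArrows[j] + 1
--         if bob_taken > numArrows: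
--             continue
--         if bob_points > max_points:
--             max_points = bob_points
--             choice[0] += numArrows - bob_taken
--             best_choice = choice[:]
--     return best_choice
-- ===== SOURCE B (Python) =====
-- from typing import List
--
-- def maximumBobPoints(numArrows: int, aliceArrows: List[int]) -> List[int]:
--     # Recursive backtracking over the 12 sections (section 11 down to 0),
--     # skip-branch first so subsets are visited in A's increasing-mask order.
--     def go(section: int, arrows_left: int, points: int, picks: List[int],
--            best: "tuple[int, List[int]]") -> "tuple[int, List[int]]":
--         if section < 0:
--             if arrows_left >= 0 and points > best[0]:
--                 out = picks.copy()
--                 out[0] += arrows_left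
--                 return (points, out)
--             return best
--         best = go(section - 1, arrows_left, points, picks, best)
--         need = aliceArrows[section] + 1
--         taken = picks.copy()
--         taken[section] = need
--         return go(section - 1, arrows_left - need, points + section, taken, best)
--     return go(11, numArrows, 0, [0] * 12, (0, [0] * 12))[1]
-- ===== Notes on version B (the rewrite author's own statement) =====
-- stated objective: alternative
-- what changed: Replaces A's flat loop over all 4096 bitmasks (with an inner 12-step bit-extraction pass rebuilding each choice list from scratch) by recursive backtracking over the 12 sections that threads arrows-left, points and the picks list incrementally, visiting subsets in the same skip-before-take order; no bitmasks or bit operations remain.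
import Mathlib
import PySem

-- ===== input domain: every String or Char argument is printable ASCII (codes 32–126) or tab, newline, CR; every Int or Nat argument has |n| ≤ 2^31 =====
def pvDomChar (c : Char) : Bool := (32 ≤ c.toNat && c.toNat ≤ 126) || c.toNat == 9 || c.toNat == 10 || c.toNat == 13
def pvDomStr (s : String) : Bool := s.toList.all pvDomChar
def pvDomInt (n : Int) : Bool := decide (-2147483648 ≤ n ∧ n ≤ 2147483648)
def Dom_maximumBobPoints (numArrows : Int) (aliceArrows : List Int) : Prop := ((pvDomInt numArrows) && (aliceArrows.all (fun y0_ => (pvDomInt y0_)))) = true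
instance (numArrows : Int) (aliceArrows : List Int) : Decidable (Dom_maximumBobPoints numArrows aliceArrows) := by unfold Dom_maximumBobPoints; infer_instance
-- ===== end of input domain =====

-- B replaces A's flat 4096-mask loop (with an inner bit-extraction pass per mask) by recursive
-- backtracking over the 12 sections, threading arrows-left/points/picks incrementally; alternative
-- decomposition, same exact result.

-- ===== PORT A =====
-- aliceArrows[j] is ported with pyGetD (default 0): under Pre_ (12 ≤ length) every index 0..11 is in
-- range, so it is exactly Python's aliceArrows[j]. `(1<<j) & mask` is PySem.Int.band ((1:Int) <<< j).
def maximumBobPoints (numArrows : Int) (aliceArrows : List Int) : List Int :=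
  (((PySem.List.pyRange 0 4096 1).foldl (fun (st : Int × List Int) mask =>
      let inner := (PySem.List.pyRange 0 12 1).foldl
        (fun (s : Int × Int × List Int) j =>
          if 0 < PySem.Int.band ((1 : Int) <<< j.toNat) mask then
            (s.1 + (PySem.List.pyGetD aliceArrows j 0 + 1), s.2.1 + j,
             PySem.List.pySetD s.2.2 j (PySem.List.pyGetD aliceArrows j 0 + 1))
          else s)
        (0, 0, List.replicate 12 0)
      if inner.1 > numArrows then st
      else if inner.2.1 > st.1 then
        (inner.2.1,
         PySem.List.pySetD inner.2.2 0
           (PySem.List.pyGetD inner.2.2 0 0 + (numArrows - inner.1)))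
      else st)
    ((0 : Int), List.replicate 12 0))).2

-- ===== PORT B =====
-- go section arrows_left points picks best, section counted as `n = section + 1` (0 = base case).
def pvGoB (aliceArrows : List Int) : Nat → Int → Int → List Int → Int × List Int → Int × List Int
  | 0, arrowsLeft, points, picks, best =>
      if 0 ≤ arrowsLeft ∧ points > best.1 then
        (points, PySem.List.pySetD picks 0 (PySem.List.pyGetD picks 0 0 + arrowsLeft))
      else best
  | n + 1, arrowsLeft, points, picks, best =>
      let best1 := pvGoB aliceArrows n arrowsLeft points picks best
      let need := PySem.List.pyGetD aliceArrows (n : Int) 0 + 1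
      pvGoB aliceArrows n (arrowsLeft - need) (points + (n : Int))
        (PySem.List.pySetD picks (n : Int) need) best1

def maximumBobPoints_alt (numArrows : Int) (aliceArrows : List Int) : List Int :=
  (pvGoB aliceArrows 12 numArrows 0 (List.replicate 12 0) ((0 : Int), List.replicate 12 0)).2

-- ===== PRECONDITION & SPEC =====
-- Pre_: Python A indexes aliceArrows[j] for every j in 0..11, so it raises IndexError iff the list
-- has fewer than 12 elements; exactly those inputs are excluded.
def Pre_maximumBobPoints (numArrows : Int) (aliceArrows : List Int) : Prop :=
  12 ≤ aliceArrows.length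
instance (numArrows : Int) (aliceArrows : List Int) : Decidable (Pre_maximumBobPoints numArrows aliceArrows) := by unfold Pre_maximumBobPoints; infer_instance

def pvWitness_maximumBobPoints : Int × List Int :=
  (6, [1, 0, 0, 2, 0, 0, 0, 0, 0, 0, 0, 0])

def Spec_maximumBobPoints (numArrows : Int) (aliceArrows : List Int) (out : List Int) : Prop := out = maximumBobPoints_alt numArrows aliceArrows
instance (numArrows : Int) (aliceArrows : List Int) (out : List Int) : Decidable (Spec_maximumBobPoints numArrows aliceArrows out) := by unfold Spec_maximumBobPoints; infer_instance

-- ===== CLAIM (what is proved, stated in full; the proofs are below) =====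
def Claim_equal_maximumBobPoints : Prop := ∀ (numArrows : Int) (aliceArrows : List Int), Dom_maximumBobPoints numArrows aliceArrows → Pre_maximumBobPoints numArrows aliceArrows → Spec_maximumBobPoints numArrows aliceArrows (maximumBobPoints numArrows aliceArrows)

-- ===== LEMMAS AND PROOFS =====

-- Spec-side description of one subset (one mask m, restricted to its low n bits):
-- total arrows taken, points, and the choice list.
def pvT (alice : List Int) : Nat → Nat → Int
  | 0, _ => 0
  | n + 1, m => pvT alice n m + (if m.testBit n then alice.getD n 0 + 1 else 0)

def pvP : Nat → Nat → Int
  | 0, _ => 0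
  | n + 1, m => pvP n m + (if m.testBit n then (n : Int) else 0)

def pvC (alice : List Int) : Nat → Nat → List Int → List Int
  | 0, _, c => c
  | n + 1, m, c => if m.testBit n then (pvC alice n m c).set n (alice.getD n 0 + 1) else pvC alice n m c

-- The common per-subset step both folds reduce to.
def pvLeaf (arrowsLeft points : Int) (c : List Int) (st : Int × List Int) : Int × List Int :=
  if 0 ≤ arrowsLeft ∧ points > st.1 then
    (points, PySem.List.pySetD c 0 (PySem.List.pyGetD c 0 0 + arrowsLeft))
  else st

lemma pvT_congr (alice : List Int) (n : Nat) {m m' : Nat}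
    (h : ∀ j < n, m.testBit j = m'.testBit j) : pvT alice n m = pvT alice n m' := by
  induction n with
  | zero => rfl
  | succ k ih =>
      simp only [pvT, ih (fun j hj => h j (Nat.lt_succ_of_lt hj)), h k (Nat.lt_succ_self k)]

lemma pvP_congr (n : Nat) {m m' : Nat}
    (h : ∀ j < n, m.testBit j = m'.testBit j) : pvP n m = pvP n m' := by
  induction n with
  | zero => rfl
  | succ k ih =>
      simp only [pvP, ih (fun j hj => h j (Nat.lt_succ_of_lt hj)), h k (Nat.lt_succ_self k)]

lemma pvC_congr (alice : List Int) (n : Nat) {m m' : Nat} (c : List Int)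
    (h : ∀ j < n, m.testBit j = m'.testBit j) : pvC alice n m c = pvC alice n m' c := by
  induction n with
  | zero => rfl
  | succ k ih =>
      simp only [pvC, ih (fun j hj => h j (Nat.lt_succ_of_lt hj)), h k (Nat.lt_succ_self k)]

-- pvC n only touches indices < n, so it commutes with a set at an index ≥ n.
lemma pvC_set_high (alice : List Int) (n : Nat) (m : Nat) (c : List Int) {k : Nat} (hk : n ≤ k)
    (v : Int) : pvC alice n m (c.set k v) = (pvC alice n m c).set k v := by
  induction n generalizing c with
  | zero => rfl
  | succ i ih =>
      have hik : i ≤ k := Nat.le_of_succ_le hk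
      simp only [pvC, ih (c := c) hik]
      split
      · exact List.set_comm _ _ (by omega)
      · rfl

-- bits of 2^n + m (m < 2^n)
lemma pv_testBit_high {m n : Nat} (hm : m < 2 ^ n) : (2 ^ n + m).testBit n = true := by
  have h := Nat.testBit_two_pow_mul_add 1 hm n
  simpa using h

lemma pv_testBit_low {m n j : Nat} (hm : m < 2 ^ n) (hj : j < n) :
    (2 ^ n + m).testBit j = m.testBit j := by
  have h := Nat.testBit_two_pow_mul_add 1 hm j
  simpa [hj] using h

-- (1 << k) & m > 0  tests bit k of m.
lemma pv_band_pos (k m : Nat) :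
    (0 < PySem.Int.band ((1 : Int) <<< ((k : Nat) : Int)) ((m : Nat) : Int)) ↔ m.testBit k = true := by
  have h1 : ((1 : Int) <<< ((k : Nat) : Int)) = ((1 <<< k : Nat) : Int) := by
    exact_mod_cast Int.shiftLeft_natCast 1 k
  rw [h1, PySem.Int.band_natCast, Nat.one_shiftLeft, Nat.two_pow_and]
  cases m.testBit k <;> simp

-- A's inner loop computes (pvT, pvP, pvC) of the mask.
lemma pv_innerA (alice : List Int) (m : Nat) (n : Nat) (t p : Int) (c : List Int) :
    (PySem.List.pyRange 0 (n : Int) 1).foldl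
      (fun (s : Int × Int × List Int) j =>
        if 0 < PySem.Int.band ((1 : Int) <<< j.toNat) ((m : Nat) : Int) then
          (s.1 + (PySem.List.pyGetD alice j 0 + 1), s.2.1 + j,
           PySem.List.pySetD s.2.2 j (PySem.List.pyGetD alice j 0 + 1))
        else s)
      (t, p, c)
    = (t + pvT alice n m, p + pvP n m, pvC alice n m c) := by
  induction n generalizing t p c with
  | zero =>
      simp [pvT, pvP, pvC]
  | succ n ih =>
      have hcast : ((n + 1 : Nat) : Int) = (n : Int) + 1 := by push_cast; ring
      rw [hcast, PySem.List.pyRange_one_succ_right (by positivity), List.foldl_append, ih]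
      simp only [List.foldl_cons, List.foldl_nil, Int.toNat_natCast]
      split_ifs with hc
      · have h : m.testBit n = true := (pv_band_pos n m).mp hc
        simp [pvT, pvP, pvC, h, add_assoc]
      · have h : m.testBit n = false := by
          cases hb : m.testBit n
          · rfl
          · exact absurd ((pv_band_pos n m).mpr hb) hc
        simp [pvT, pvP, pvC, h]

-- B's recursion is the fold of pvLeaf over the masks 0..2^n-1 in increasing order.
lemma pv_goB_eq (alice : List Int) (n : Nat) (aL pts : Int) (picks : List Int)
    (best : Int × List Int) :
    pvGoB alice n aL pts picks best
      = (List.range (2 ^ n)).foldl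
          (fun b m => pvLeaf (aL - pvT alice n m) (pts + pvP n m) (pvC alice n m picks) b) best := by
  induction n generalizing aL pts picks best with
  | zero =>
      simp only [pow_zero, List.range_one, List.foldl_cons, List.foldl_nil,
        pvT, pvP, pvC, sub_zero, add_zero]
      rfl
  | succ n ih =>
      have hsplit : (2 : Nat) ^ (n + 1) = 2 ^ n + 2 ^ n := by ring
      rw [hsplit, List.range_add, List.foldl_append, List.foldl_map]
      have hlow : ∀ (b : Int × List Int), ∀ x ∈ List.range (2 ^ n),
          pvLeaf (aL - pvT alice (n + 1) x) (pts + pvP (n + 1) x) (pvC alice (n + 1) x picks) b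
            = pvLeaf (aL - pvT alice n x) (pts + pvP n x) (pvC alice n x picks) b := by
        intro b x hx
        have hb : x.testBit n = false := Nat.testBit_lt_two_pow (List.mem_range.mp hx)
        simp [pvT, pvP, pvC, hb]
      rw [PySem.List.foldl_congr_mem _ _ _ _ hlow, ← ih]
      have hhigh : ∀ (b : Int × List Int), ∀ x ∈ List.range (2 ^ n),
          pvLeaf (aL - pvT alice (n + 1) (2 ^ n + x)) (pts + pvP (n + 1) (2 ^ n + x))
              (pvC alice (n + 1) (2 ^ n + x) picks) b
            = pvLeaf ((aL - (alice.getD n 0 + 1)) - pvT alice n x)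
                ((pts + (n : Int)) + pvP n x) (pvC alice n x (picks.set n (alice.getD n 0 + 1))) b := by
        intro b x hx
        have hx' : x < 2 ^ n := List.mem_range.mp hx
        have hcongr : ∀ j < n, (2 ^ n + x).testBit j = x.testBit j :=
          fun j hj => pv_testBit_low hx' hj
        have hT : pvT alice (n + 1) (2 ^ n + x) = pvT alice n x + (alice.getD n 0 + 1) := by
          simp [pvT, pv_testBit_high hx', pvT_congr alice n hcongr]
        have hP : pvP (n + 1) (2 ^ n + x) = pvP n x + (n : Int) := by
          simp [pvP, pv_testBit_high hx', pvP_congr n hcongr]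
        have hC : pvC alice (n + 1) (2 ^ n + x) picks
            = pvC alice n x (picks.set n (alice.getD n 0 + 1)) := by
          simp [pvC, pv_testBit_high hx', pvC_congr alice n picks hcongr,
            pvC_set_high alice n x picks (le_refl n)]
        rw [hT, hP, hC]
        congr 1 <;> ring
      rw [PySem.List.foldl_congr_mem _ _ _ _ hhigh, ← ih]
      simp [pvGoB, PySem.List.pyGetD_natCast, PySem.List.pySetD_natCast]

-- ===== VERDICT (by name: the statement is the Claim_ definition above) =====
theorem maximumBobPoints_spec : Claim_equal_maximumBobPoints := by
  intro numArrows alice _ _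
  unfold Spec_maximumBobPoints maximumBobPoints maximumBobPoints_alt
  rw [pv_goB_eq, PySem.List.pyRange_zero 4096]
  rw [show ((4096 : Int).toNat) = 4096 from rfl]
  simp only [zero_add, List.foldl_map]
  rw [show (2 : Nat) ^ 12 = 4096 from by norm_num]
  apply congrArg
  apply PySem.List.foldl_congr_mem
  intro st k _
  have hin := pv_innerA alice k 12 0 0 (List.replicate 12 0)
  simp only [Nat.cast_ofNat, zero_add] at hin
  rw [hin]
  simp only [pvLeaf]
  split_ifs <;> first | rfl | omega
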